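-- pv_equiv track=rewrite | github.com/crypto-starlab/THOR | liberate/src/liberate/fhe/context/security_parameters.py | partitq
-- ===== SOURCE A (Python) =====
-- security_levels = [128, 192, 256]
--
-- def partitq(q):
--     q_len = len(q)
--     lev_len = len(security_levels)
--     grouped = [
--         [q[i] for i in range(0 + lev, q_len, lev_len)] for lev in range(lev_len)
--     ]
--     by_sec_lev = {lev: grouped[l] for l, lev in enumerate(security_levels)}
--     return by_sec_lev
-- ===== SOURCE B (Python) =====
-- security_levels = [128, 192, 256]
--
-- def partitq(q):
--     # one distributing pass: element i goes to bucket i % 3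
--     groups = ([], [], [])
--     for i, x in enumerate(q):
--         groups[i % 3].append(x)
--     return {128: groups[0], 192: groups[1], 256: groups[2]}
-- ===== Notes on version B (the rewrite author's own statement) =====
-- stated objective: alternative
-- what changed: A gathers each group with a separate strided index pass (range(lev, len(q), 3)) and then builds the dict from enumerate(security_levels); B makes a single distributing pass over enumerate(q), appending each element to the bucket selected by i % 3.
import Mathlib
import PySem

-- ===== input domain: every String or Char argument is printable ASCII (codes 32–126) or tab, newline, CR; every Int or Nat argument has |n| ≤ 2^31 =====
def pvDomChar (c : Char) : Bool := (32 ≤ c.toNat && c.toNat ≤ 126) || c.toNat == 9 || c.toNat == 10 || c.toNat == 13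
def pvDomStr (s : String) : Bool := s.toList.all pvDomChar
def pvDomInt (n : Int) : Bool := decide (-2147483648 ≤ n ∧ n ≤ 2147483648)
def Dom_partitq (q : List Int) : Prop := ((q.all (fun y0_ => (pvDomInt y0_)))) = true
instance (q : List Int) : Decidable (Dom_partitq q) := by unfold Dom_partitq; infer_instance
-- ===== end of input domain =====

-- B replaces A's three strided gather passes by one distributing pass keyed by i % 3 (alternative decomposition, same cost).

-- ===== PORT A =====
def securityLevels : List Int := [128, 192, 256]

def partitq (q : List Int) : List (Int × List Int) :=
  let qLen : Int := q.length
  let levLen : Int := securityLevels.length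
  let grouped : List (List Int) :=
    (PySem.List.pyRange 0 levLen 1).map (fun lev =>
      (PySem.List.pyRange (0 + lev) qLen levLen).map (fun i => PySem.List.pyGetD q i 0))
  let bySecLev : PySem.Dict Int (List Int) :=
    (PySem.List.enumerate securityLevels).foldl
      (fun d p => d.insert p.2 (PySem.List.pyGetD grouped p.1 []))
      PySem.Dict.empty
  bySecLev.items

-- ===== PORT B =====
def partitq_alt (q : List Int) : List (Int × List Int) :=
  let groups : List Int × List Int × List Int :=
    (PySem.List.enumerate q).foldl
      (fun (acc : List Int × List Int × List Int) p =>
        let r := PySem.Int.mod p.1 3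
        if r = 0 then (acc.1 ++ [p.2], acc.2.1, acc.2.2)
        else if r = 1 then (acc.1, acc.2.1 ++ [p.2], acc.2.2)
        else (acc.1, acc.2.1, acc.2.2 ++ [p.2]))
      ([], [], [])
  [(128, groups.1), (192, groups.2.1), (256, groups.2.2)]

-- ===== PRECONDITION & SPEC =====
def Spec_partitq (q : List Int) (out : List (Int × List Int)) : Prop := out = partitq_alt q
instance (q : List Int) (out : List (Int × List Int)) : Decidable (Spec_partitq q out) := by unfold Spec_partitq; infer_instance

-- ===== CLAIM (what is proved, stated in full; the proofs are below) =====
def Claim_equal_partitq : Prop := ∀ (q : List Int), Dom_partitq q → Spec_partitq q (partitq q)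

-- ===== LEMMAS AND PROOFS =====

/-- Proof helper: the mod-3 partition of a list, by structural rotation. -/
def selRot : List Int → List Int × List Int × List Int
  | [] => ([], [], [])
  | x :: t => let p := selRot t; (x :: p.2.2, p.1, p.2.1)

/-- Proof helper: A's group starting at index `a`. -/
def gA (a : Int) (q : List Int) : List Int :=
  (PySem.List.pyRange a (q.length : Int) 3).map (fun i => PySem.List.pyGetD q i 0)

lemma pyRange3_shift (a b : Int) :
    PySem.List.pyRange (a + 1) (b + 1) 3 = (PySem.List.pyRange a b 3).map (· + 1) := by
  rw [PySem.List.pyRange_of_pos _ _ (by norm_num), PySem.List.pyRange_of_pos _ _ (by norm_num)]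
  have hc : (if a + 1 < b + 1 then ((b + 1 - (a + 1) + 3 - 1) / 3).toNat else 0)
      = (if a < b then ((b - a + 3 - 1) / 3).toNat else 0) := by
    split <;> split <;> omega
  rw [hc, List.map_map]
  exact List.map_congr_left (fun k _ => by simp [Function.comp]; ring)

lemma gA_shift (x : Int) (t : List Int) (a : Int) (h : 0 ≤ a) :
    gA (a + 1) (x :: t) = gA a t := by
  unfold gA
  rw [show ((x :: t).length : Int) = (t.length : Int) + 1 by simp, pyRange3_shift, List.map_map]
  refine List.map_congr_left (fun i hi => ?_)
  have hi0 : 0 ≤ i := by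
    have := (PySem.List.mem_pyRange_iff_of_pos (by norm_num : (0:Int) < 3) i).mp hi
    omega
  simp only [Function.comp]
  rw [PySem.List.pyGetD_of_nonneg (x :: t) 0 (by omega), PySem.List.pyGetD_of_nonneg t 0 hi0]
  have hnt : (i + 1).toNat = i.toNat + 1 := by omega
  simp [hnt]

lemma pyRange3_cons_zero (b : Int) (h : 0 < b) :
    PySem.List.pyRange 0 b 3 = 0 :: PySem.List.pyRange 3 b 3 := by
  rw [PySem.List.pyRange_of_pos _ _ (by norm_num), PySem.List.pyRange_of_pos _ _ (by norm_num)]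
  have hK : (if (0:Int) < b then ((b - 0 + 3 - 1) / 3).toNat else 0)
      = (if (3:Int) < b then ((b - 3 + 3 - 1) / 3).toNat else 0) + 1 := by
    split <;> split <;> omega
  rw [hK, List.range_succ_eq_map, List.map_cons, List.map_map]
  refine congrArg₂ _ (by norm_num) (List.map_congr_left (fun k _ => ?_))
  simp [Function.comp]; ring

lemma gA_cons_zero (x : Int) (t : List Int) :
    gA 0 (x :: t) = x :: gA 2 t := by
  have h3 : gA 3 (x :: t) = gA 2 t := by
    simpa using gA_shift x t 2 (by norm_num)
  unfold gA
  rw [show ((x :: t).length : Int) = (t.length : Int) + 1 by simp,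
      pyRange3_cons_zero _ (by omega), List.map_cons]
  refine congrArg₂ _ (by rw [PySem.List.pyGetD_of_nonneg (x :: t) 0 le_rfl]; rfl) ?_
  unfold gA at h3
  rw [show ((x :: t).length : Int) = (t.length : Int) + 1 by simp] at h3
  exact h3

lemma gA_eq_selRot (q : List Int) :
    (gA 0 q, gA 1 q, gA 2 q) = selRot q := by
  induction q with
  | nil =>
      have h : ∀ a : Int, 0 ≤ a → gA a [] = [] := by
        intro a ha
        unfold gA
        simp only [List.length_nil, Nat.cast_zero]
        rw [PySem.List.pyRange_of_pos _ _ (by norm_num), if_neg (by omega)]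
        simp
      simp [selRot, h 0 le_rfl, h 1 (by norm_num), h 2 (by norm_num)]
  | cons x t ih =>
      have h1 : gA 1 (x :: t) = gA 0 t := by simpa using gA_shift x t 0 le_rfl
      have h2 : gA 2 (x :: t) = gA 1 t := by simpa using gA_shift x t 1 (by norm_num)
      rw [gA_cons_zero, h1, h2, selRot, ← ih]

/-- Proof helper: the distributing pass of B, with running start index. -/
def dist3 (s : Int) : List Int → List Int × List Int × List Int
  | [] => ([], [], [])
  | x :: t =>
      let p := dist3 (s + 1) t
      let r := PySem.Int.mod s 3
      if r = 0 then (x :: p.1, p.2.1, p.2.2)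
      else if r = 1 then (p.1, x :: p.2.1, p.2.2)
      else (p.1, p.2.1, x :: p.2.2)

lemma mod3_cases (s : Int) :
    PySem.Int.mod s 3 = 0 ∨ PySem.Int.mod s 3 = 1 ∨ PySem.Int.mod s 3 = 2 := by
  rw [PySem.Int.mod_eq_emod_of_pos (by norm_num)]
  omega

lemma foldB_dist (q : List Int) : ∀ (s : Int) (a b c : List Int),
    (PySem.List.enumerate q s).foldl
      (fun (acc : List Int × List Int × List Int) p =>
        let r := PySem.Int.mod p.1 3
        if r = 0 then (acc.1 ++ [p.2], acc.2.1, acc.2.2)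
        else if r = 1 then (acc.1, acc.2.1 ++ [p.2], acc.2.2)
        else (acc.1, acc.2.1, acc.2.2 ++ [p.2]))
      (a, b, c)
    = (a ++ (dist3 s q).1, b ++ (dist3 s q).2.1, c ++ (dist3 s q).2.2) := by
  induction q with
  | nil => intro s a b c; simp [dist3, PySem.List.enumerate_nil]
  | cons x t ih =>
      intro s a b c
      rw [PySem.List.enumerate_cons, List.foldl_cons]
      have ih' : ∀ (I : List Int × List Int × List Int),
          List.foldl (fun (acc : List Int × List Int × List Int) p =>
            let r := PySem.Int.mod p.1 3;
            if r = 0 then (acc.1 ++ [p.2], acc.2.1, acc.2.2)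
            else if r = 1 then (acc.1, acc.2.1 ++ [p.2], acc.2.2)
            else (acc.1, acc.2.1, acc.2.2 ++ [p.2])) I (PySem.List.enumerate t (s + 1))
            = (I.1 ++ (dist3 (s + 1) t).1, I.2.1 ++ (dist3 (s + 1) t).2.1,
               I.2.2 ++ (dist3 (s + 1) t).2.2) :=
        fun I => ih (s + 1) I.1 I.2.1 I.2.2
      rw [ih']
      have h' : s % 3 = PySem.Int.mod s 3 :=
        (PySem.Int.mod_eq_emod_of_pos (by norm_num)).symm
      rcases mod3_cases s with h | h | h <;> rw [h] at h'
      · have hd : 3 ∣ s := by omega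
        simp [dist3, h']
      · simp [dist3, h']
      · simp [dist3, h']

lemma dist3_selRot (q : List Int) : ∀ (s : Int),
    (PySem.Int.mod s 3 = 0 → dist3 s q = selRot q) ∧
    (PySem.Int.mod s 3 = 1 → dist3 s q = ((selRot q).2.2, (selRot q).1, (selRot q).2.1)) ∧
    (PySem.Int.mod s 3 = 2 → dist3 s q = ((selRot q).2.1, (selRot q).2.2, (selRot q).1)) := by
  induction q with
  | nil => intro s; simp [dist3, selRot]
  | cons x t ih =>
      intro s
      refine ⟨fun h0 => ?_, fun h1 => ?_, fun h2 => ?_⟩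
      · have h0' : s % 3 = 0 := by
          rwa [PySem.Int.mod_eq_emod_of_pos (by norm_num)] at h0
        have hs1 : PySem.Int.mod (s + 1) 3 = 1 := by
          rw [PySem.Int.mod_eq_emod_of_pos (by norm_num)]; omega
        have hd : 3 ∣ s := by omega
        simp [dist3, selRot, hd, (ih (s + 1)).2.1 hs1]
      · have h1' : s % 3 = 1 := by
          rwa [PySem.Int.mod_eq_emod_of_pos (by norm_num)] at h1
        have hs1 : PySem.Int.mod (s + 1) 3 = 2 := by
          rw [PySem.Int.mod_eq_emod_of_pos (by norm_num)]; omega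
        have hnd : ¬ (3 : Int) ∣ s := by omega
        simp [dist3, selRot, h1', (ih (s + 1)).2.2 hs1]
      · have h2' : s % 3 = 2 := by
          rwa [PySem.Int.mod_eq_emod_of_pos (by norm_num)] at h2
        have hs1 : PySem.Int.mod (s + 1) 3 = 0 := by
          rw [PySem.Int.mod_eq_emod_of_pos (by norm_num)]; omega
        have hnd : ¬ (3 : Int) ∣ s := by omega
        simp [dist3, selRot, h2', (ih (s + 1)).1 hs1]

lemma partitq_alt_eq (q : List Int) :
    partitq_alt q = [(128, (selRot q).1), (192, (selRot q).2.1), (256, (selRot q).2.2)] := by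
  simp only [partitq_alt]
  rw [foldB_dist q 0 [] [] [], (dist3_selRot q 0).1 (by decide)]
  simp

lemma partitq_eq (q : List Int) :
    partitq q = [(128, gA 0 q), (192, gA 1 q), (256, gA 2 q)] := by
  unfold partitq gA
  rfl

-- ===== VERDICT (by name: the statement is the Claim_ definition above) =====
theorem partitq_spec : Claim_equal_partitq := by
  intro q _
  unfold Spec_partitq
  rw [partitq_eq, partitq_alt_eq, ← gA_eq_selRot]
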